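-- pv_equiv track=rewrite | github.com/shepherdmrf/backend-all | src/main/resources/python/MultifacetedModeling/FeatureSelection/DncorCal.py | eliminate_duplicate
-- ===== SOURCE A (Python) =====
-- def eliminate_duplicate(KD_NCOR):
--     duplicates = []
--     for x in KD_NCOR:
--         for index_1, y in enumerate(x):
--             for z in y:
--                 for index_2 in range(index_1 + 1, len(x)):
--                     for p in x[index_2]:
--                         duplicates.append([z, p])
--     return duplicates
-- ===== SOURCE B (Python) =====
-- def eliminate_duplicate(KD_NCOR):
--     duplicates = []
--     for x in KD_NCOR:
--         # backward pass: pair each sublist with the flattened concatenation of all later sublists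
--         table = []
--         later = []
--         for y in reversed(x):
--             table.append((y, later))
--             later = y + later
--         table.reverse()
--         # forward pass: emit the pairs from the precomputed suffix table
--         for y, suf in table:
--             for z in y:
--                 for p in suf:
--                     duplicates.append([z, p])
--     return duplicates
-- ===== Notes on version B (the rewrite author's own statement) =====
-- stated objective: alternative
-- what changed: Replaces the 5-deep nested rescanning (range(index_1+1,len(x)) with repeated x[index_2] indexing per element z) by a two-pass scheme per x: a backward pass precomputes, for each position, the flattened concatenation of all later sublists, and a forward pass emits [z,p] pairs from that table.
import Mathlib
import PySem

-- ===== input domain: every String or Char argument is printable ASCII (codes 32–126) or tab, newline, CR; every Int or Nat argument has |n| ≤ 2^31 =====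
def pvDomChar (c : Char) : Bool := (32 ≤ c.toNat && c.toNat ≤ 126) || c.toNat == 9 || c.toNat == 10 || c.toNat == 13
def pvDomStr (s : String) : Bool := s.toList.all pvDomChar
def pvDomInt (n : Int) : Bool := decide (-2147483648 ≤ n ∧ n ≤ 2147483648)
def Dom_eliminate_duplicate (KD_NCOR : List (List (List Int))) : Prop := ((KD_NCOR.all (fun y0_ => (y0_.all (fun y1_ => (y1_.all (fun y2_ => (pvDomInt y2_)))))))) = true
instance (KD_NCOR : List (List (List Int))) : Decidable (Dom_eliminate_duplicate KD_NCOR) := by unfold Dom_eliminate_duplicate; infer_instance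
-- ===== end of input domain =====

-- B replaces A's 5-deep nested index rescanning by a per-x backward suffix-flatten pass plus a forward emit pass (alternative decomposition, same results).


-- ===== PORT A =====
def eliminate_duplicate (KD_NCOR : List (List (List Int))) : List (List Int) :=
  KD_NCOR.foldl (fun dup x =>
    (PySem.List.enumerate x 0).foldl (fun dup iy =>
      iy.2.foldl (fun dup z =>
        (PySem.List.pyRange (iy.1 + 1) (PySem.List.len x) 1).foldl (fun dup j =>
          (PySem.List.pyGetD x j []).foldl (fun dup p => dup ++ [[z, p]]) dup) dup) dup) dup) []

-- ===== PORT B =====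
-- backward pass of B: pairs each sublist with the flattened concatenation of all later sublists;
-- second component is the running `later` accumulator
def pvSuffixTab : List (List Int) → (List ((List Int) × (List Int))) × (List Int)
  | [] => ([], [])
  | y :: rest =>
    let r := pvSuffixTab rest
    ((y, r.2) :: r.1, y ++ r.2)

def eliminate_duplicate_alt (KD_NCOR : List (List (List Int))) : List (List Int) :=
  KD_NCOR.foldl (fun dup x =>
    (pvSuffixTab x).1.foldl (fun dup pr =>
      pr.1.foldl (fun dup z =>
        pr.2.foldl (fun dup p => dup ++ [[z, p]]) dup) dup) dup) []

-- ===== PRECONDITION & SPEC =====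
def Spec_eliminate_duplicate (KD_NCOR : List (List (List Int))) (out : List (List Int)) : Prop := out = eliminate_duplicate_alt KD_NCOR
instance (KD_NCOR : List (List (List Int))) (out : List (List Int)) : Decidable (Spec_eliminate_duplicate KD_NCOR out) := by unfold Spec_eliminate_duplicate; infer_instance

-- ===== CLAIM (what is proved, stated in full; the proofs are below) =====
def Claim_equal_eliminate_duplicate : Prop := ∀ (KD_NCOR : List (List (List Int))), Dom_eliminate_duplicate KD_NCOR → Spec_eliminate_duplicate KD_NCOR (eliminate_duplicate KD_NCOR)

-- ===== LEMMAS AND PROOFS =====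

-- common normal form of the per-x contribution
def pvPairs : List (List Int) → List (List Int)
  | [] => []
  | y :: rest => (y.flatMap fun z => rest.flatten.map fun p => [z, p]) ++ pvPairs rest

theorem pvSuffixTab_snd (x : List (List Int)) : (pvSuffixTab x).2 = x.flatten := by
  induction x with
  | nil => rfl
  | cons y rest ih => simp [pvSuffixTab, ih]

theorem pvEmitB (x : List (List Int)) :
    ∀ acc : List (List Int),
      (pvSuffixTab x).1.foldl (fun dup pr =>
        pr.1.foldl (fun dup z =>
          pr.2.foldl (fun dup p => dup ++ [[z, p]]) dup) dup) acc = acc ++ pvPairs x := by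
  induction x with
  | nil => intro acc; simp [pvSuffixTab, pvPairs]
  | cons y rest ih =>
    intro acc
    simp only [pvSuffixTab, List.foldl_cons]
    rw [ih]
    simp only [pvSuffixTab_snd, PySem.List.foldl_append_singleton_eq_map]
    rw [PySem.List.foldl_append_eq_flatMap]
    simp [pvPairs]

theorem pvEmitA (x : List (List Int)) :
    ∀ (rest : List (List Int)) (k : Nat), x.drop k = rest →
    ∀ acc : List (List Int),
      (PySem.List.enumerate rest (k : Int)).foldl (fun dup iy =>
        iy.2.foldl (fun dup z =>
          (PySem.List.pyRange (iy.1 + 1) (PySem.List.len x) 1).foldl (fun dup j =>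
            (PySem.List.pyGetD x j []).foldl (fun dup p => dup ++ [[z, p]]) dup) dup) dup) acc
      = acc ++ pvPairs rest := by
  intro rest
  induction rest with
  | nil => intro k hk acc; simp [PySem.List.enumerate_nil, pvPairs]
  | cons y t ih =>
    intro k hk acc
    have ht : x.drop (k + 1) = t := by
      have := congrArg List.tail hk
      simpa [List.tail_drop] using this
    rw [PySem.List.enumerate_cons]
    simp only [List.foldl_cons]
    -- compute the per-entry block
    have hinner : ∀ (z : Int) (dup : List (List Int)),
        List.foldl (fun dup j =>
            (PySem.List.pyGetD x j []).foldl (fun dup p => dup ++ [[z, p]]) dup) dup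
          (PySem.List.pyRange ((k : Int) + 1) (PySem.List.len x) 1) =
        dup ++ t.flatten.map (fun p => [z, p]) := by
      intro z dup
      rw [PySem.List.foldl_pyRange_pyGetD x []
            (fun (a : List (List Int)) (ys : List Int) => List.foldl (fun d p => d ++ [[z, p]]) a ys)
            dup (by omega)]
      have hkn : ((k : Int) + 1).toNat = k + 1 := by omega
      rw [hkn, ht]
      simp only [PySem.List.foldl_append_singleton_eq_map]
      rw [PySem.List.foldl_append_eq_flatMap]
      simp [List.flatMap_def, List.map_flatten]
    simp only [hinner]
    rw [PySem.List.foldl_append_eq_flatMap]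
    have hcast : ((k : Int) + 1) = ((k + 1 : Nat) : Int) := by push_cast; ring
    rw [hcast, ih (k + 1) ht]
    simp [pvPairs]

-- ===== VERDICT (by name: the statement is the Claim_ definition above) =====
theorem eliminate_duplicate_spec : Claim_equal_eliminate_duplicate := by
  intro KD_NCOR _
  unfold Spec_eliminate_duplicate eliminate_duplicate eliminate_duplicate_alt
  refine PySem.List.foldl_congr_mem _ _ _ _ ?_
  intro acc x _
  rw [pvEmitB x acc]
  simpa using pvEmitA x x 0 (by simp) acc
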